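-- pv_equiv track=rewrite | github.com/drsezzer/CodingChallenge | personas/SherlockHolmes.py | find_transitive_dependents
-- ===== SOURCE A (Python) =====
-- def find_transitive_dependents(graph):
--     from collections import defaultdict, deque
--     transitive_dependents_count = defaultdict(int)
--
--     def bfs(start):
--         visited = set()
--         queue = deque([start])
--         while queue:
--             node = queue.popleft()
--             for dependent in graph[node]:
--                 if dependent not in visited:
--                     visited.add(dependent)
--                     queue.append(dependent)
--                     transitive_dependents_count[start] += 1
--
--     nodes = list(graph.keys())
--     for node in nodes:
--         bfs(node)
--
--     return transitive_dependents_count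
-- ===== SOURCE B (Python) =====
-- def find_transitive_dependents(graph):
--     # Global fixed-point (semi-naive) transitive closure: no per-start traversal,
--     # no queue -- saturate reach[n] = dependents reachable from n until stable.
--     reach = {n: set(deps) for n, deps in graph.items()}
--     changed = True
--     while changed:
--         changed = False
--         for n, deps in graph.items():
--             extra = set()
--             for d in deps:
--                 extra |= reach[d]
--             if not extra <= reach[n]:
--                 reach[n] |= extra
--                 changed = True
--     return {n: len(r) for n, r in reach.items() if r}
-- ===== Notes on version B (the rewrite author's own statement) =====
-- stated objective: alternative
-- what changed: Replaces the per-start BFS traversal (queue + visited set + per-discovery counter) with a global fixed-point computation: one reach-set per node, repeatedly unioning dependents' reach sets until nothing changes, then reading off the set sizes.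
import Mathlib
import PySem

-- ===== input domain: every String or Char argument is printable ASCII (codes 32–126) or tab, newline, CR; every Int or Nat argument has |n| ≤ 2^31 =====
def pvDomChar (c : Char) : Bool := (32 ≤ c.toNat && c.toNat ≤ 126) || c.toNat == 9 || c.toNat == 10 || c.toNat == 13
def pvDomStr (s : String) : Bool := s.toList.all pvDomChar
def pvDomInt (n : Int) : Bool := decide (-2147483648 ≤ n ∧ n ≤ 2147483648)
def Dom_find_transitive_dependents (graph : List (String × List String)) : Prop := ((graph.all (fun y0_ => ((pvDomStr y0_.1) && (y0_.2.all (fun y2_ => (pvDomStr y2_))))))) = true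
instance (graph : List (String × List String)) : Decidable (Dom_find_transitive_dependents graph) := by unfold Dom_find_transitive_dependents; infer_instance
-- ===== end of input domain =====

-- B replaces A's per-start BFS (queue + visited set + per-discovery counter) by a global
-- fixed-point computation: one reach set per node, saturated until stable (same values).

-- ===== PORT A =====

-- graph[node]: Dict.get? = none is exactly Python's KeyError, excluded by Pre_ below
-- (the [] default is never reached on inputs satisfying Pre_).
def pvAdj (graph : List (String × List String)) (node : String) : List String :=
  ((PySem.Dict.mk graph).get? node).getD []

-- fuel for A's worklist loop: strictly more than the number of pops the loop can make
-- (each pop beyond the seed is preceded by adding a fresh dependent to `visited`);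
-- the lemmas below prove the 0-fuel branch is never reached.
def pvFuel (graph : List (String × List String)) : Nat :=
  (graph.map (fun p => p.2.length)).sum + 2

-- the `while queue:` loop of A's bfs(start): state = (visited, queue, transitive_dependents_count)
def pvBfsLoop (graph : List (String × List String)) (start : String) :
    Nat → PySem.Set String → List String → PySem.Dict String Int → PySem.Dict String Int
  | 0, _, _, tdc => tdc
  | fuel+1, visited, queue, tdc =>
    match queue with
    | [] => tdc
    | node :: rest =>
      let st := (pvAdj graph node).foldl
        (fun (st : PySem.Set String × List String × PySem.Dict String Int) dep =>
          if dep ∈ st.1 then st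
          else (PySem.Set.add st.1 dep, st.2.1 ++ [dep], st.2.2.modify start 0 (· + 1)))
        (visited, rest, tdc)
      pvBfsLoop graph start fuel st.1 st.2.1 st.2.2

def find_transitive_dependents (graph : List (String × List String)) : List (String × Int) :=
  (((PySem.Dict.mk graph).keys).foldl
    (fun tdc node => pvBfsLoop graph node (pvFuel graph) PySem.Set.empty [node] tdc)
    PySem.Dict.empty).items

-- ===== PORT B =====

-- the inner `extra = set(); for d in deps: extra |= reach[d]` loop
-- (reach[d]: under Pre_ every dependent is a key, so the [] default is never reached)
def pvExtraOf (reach : PySem.Dict String (PySem.Set String)) (deps : List String) :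
    PySem.Set String :=
  deps.foldl (fun acc d => PySem.Set.union acc (reach.getD d [])) PySem.Set.empty

-- one key's update inside the `for n, deps in graph.items():` pass; state = (reach, changed)
def pvStepB (st : PySem.Dict String (PySem.Set String) × Bool) (p : String × List String) :
    PySem.Dict String (PySem.Set String) × Bool :=
  let extra := pvExtraOf st.1 p.2
  if PySem.Set.issubset extra (st.1.getD p.1 []) then st
  else (st.1.insert p.1 (PySem.Set.union (st.1.getD p.1 []) extra), true)

-- the `while changed:` saturation loop, with fuel (the lemmas below prove the
-- 0-fuel branch is never reached: every changed pass grows the total size, which is bounded)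
def pvSat (g : List (String × List String)) :
    Nat → PySem.Dict String (PySem.Set String) → PySem.Dict String (PySem.Set String)
  | 0, reach => reach
  | f+1, reach =>
    let pr := g.foldl pvStepB (reach, false)
    if pr.2 then pvSat g f pr.1 else pr.1

def pvSatFuel (g : List (String × List String)) : Nat :=
  g.length * (g.map (fun p => p.2.length)).sum + 2

-- under Pre_ the keys are distinct, so iterating graph.items() is iterating the list itself
def find_transitive_dependents_alt (graph : List (String × List String)) : List (String × Int) :=
  let reach := pvSat graph (pvSatFuel graph)
    (PySem.Dict.mk (graph.map (fun p => (p.1, PySem.Set.ofList p.2))))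
  (PySem.Dict.mk (reach.items.filterMap (fun p =>
    if p.2.isEmpty then none else some (p.1, (PySem.Set.len p.2 : Int))))).items

-- ===== PRECONDITION & SPEC =====
-- Pre_ excludes (a) dependents that are not keys of the dict — there A (and B) raise KeyError —
-- and (b) association lists with duplicate keys, which do not arise from a Python dict.
def Pre_find_transitive_dependents (graph : List (String × List String)) : Prop :=
  (graph.map Prod.fst).Nodup ∧ ∀ p ∈ graph, ∀ d ∈ p.2, d ∈ graph.map Prod.fst
instance (graph : List (String × List String)) : Decidable (Pre_find_transitive_dependents graph) := by
  unfold Pre_find_transitive_dependents; infer_instance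

def pvWitness_find_transitive_dependents : (List (String × List String)) :=
  [("a", ["b", "c"]), ("b", ["a"]), ("c", [])]

def Spec_find_transitive_dependents (graph : List (String × List String)) (out : List (String × Int)) : Prop := out = find_transitive_dependents_alt graph
instance (graph : List (String × List String)) (out : List (String × Int)) : Decidable (Spec_find_transitive_dependents graph out) := by unfold Spec_find_transitive_dependents; infer_instance

-- ===== CLAIM (what is proved, stated in full; the proofs are below) =====
def Claim_equal_find_transitive_dependents : Prop := ∀ (graph : List (String × List String)), Dom_find_transitive_dependents graph → Pre_find_transitive_dependents graph → Spec_find_transitive_dependents graph (find_transitive_dependents graph)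

-- ===== LEMMAS AND PROOFS =====

-- All dependent lists of the graph, concatenated.
def pvFlat (g : List (String × List String)) : List String := (g.map Prod.snd).flatten

-- A's BFS loop, stripped of the counter: `push` appends the fresh node to the queue.
def pvStep (push : List String → String → List String)
    (st : PySem.Set String × List String) (d : String) : PySem.Set String × List String :=
  if d ∈ st.1 then st else (PySem.Set.add st.1 d, push st.2 d)

def pvRun (g : List (String × List String)) (push : List String → String → List String) :
    Nat → PySem.Set String → List String → PySem.Set String
  | 0, vis, _ => vis
  | _+1, vis, [] => vis
  | f+1, vis, n :: rest =>
    let st := (pvAdj g n).foldl (pvStep push) (vis, rest)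
    pvRun g push f st.1 st.2

def pvGoodPush (push : List String → String → List String) : Prop :=
  (∀ q d x, x ∈ push q d ↔ x ∈ q ∨ x = d) ∧ ∀ q d, (push q d).length = q.length + 1

-- the set of nodes A's bfs(s) visits (defined via the counter-free loop)
def pvRset (g : List (String × List String)) (s : String) : PySem.Set String :=
  pvRun g (fun q d => q ++ [d]) (pvFuel g) [] [s]

-- k-fold `tdc[start] += 1` on a defaultdict(int)
def pvBump (t : PySem.Dict String Int) (s : String) (k : Nat) : PySem.Dict String Int :=
  (fun t => PySem.Dict.modify t s 0 (· + 1))^[k] t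

theorem pvGoodPushQ : pvGoodPush (fun q d => q ++ [d]) := by
  constructor
  · intro q d x; simp
  · intro q d; simp

theorem pvGet?_mem_snd (g : List (String × List String)) (n : String) (l : List String)
    (h : (PySem.Dict.mk g).get? n = some l) : l ∈ g.map Prod.snd := by
  induction g with
  | nil => simp [PySem.Dict.get?] at h
  | cons p t ih =>
    rw [show (PySem.Dict.mk (p :: t)) = PySem.Dict.mk ((p.1, p.2) :: t) by rfl] at h
    rw [PySem.Dict.get?_mk_cons] at h
    by_cases hb : (p.1 == n) = true
    · simp [hb] at h; simp [← h]
    · simp [hb] at h; simp [ih h]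

theorem pvAdj_sub (g : List (String × List String)) (n : String) : pvAdj g n ⊆ pvFlat g := by
  unfold pvAdj
  cases h : (PySem.Dict.mk g).get? n with
  | none => simp
  | some l =>
    simp only [Option.getD_some]
    intro x hx
    unfold pvFlat
    exact List.mem_flatten.mpr ⟨l, pvGet?_mem_snd g n l h, hx⟩

-- under Pre_, the adjacency of a listed key is its listed dependent list
theorem pvAdj_eq (g : List (String × List String)) (hnd : (g.map Prod.fst).Nodup)
    (p : String × List String) (hp : p ∈ g) : pvAdj g p.1 = p.2 := by
  have h : (PySem.Dict.mk g).get? p.1 = some p.2 :=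
    PySem.Dict.get?_of_mem_items (PySem.Dict.mk g) (by simpa using hp) (by simpa using hnd)
  simp [pvAdj, h]

theorem pvNodupLen {l m : List String} (h : l.Nodup) (hs : l ⊆ m) : l.length ≤ m.length := by
  calc l.length = l.toFinset.card := (List.toFinset_card_of_nodup h).symm
  _ ≤ m.toFinset.card := Finset.card_le_card (by intro x hx; simp at hx ⊢; exact hs hx)
  _ ≤ m.length := m.toFinset_card_le

-- facts about one pass of the inner `for dependent in graph[node]:` fold
theorem pvFold_facts (push : List String → String → List String) (hp : pvGoodPush push)
    (deps : List String) (vis : PySem.Set String) (q : List String) :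
    (vis <+: (deps.foldl (pvStep push) (vis, q)).1)
    ∧ (∀ d ∈ deps, d ∈ (deps.foldl (pvStep push) (vis, q)).1)
    ∧ (∀ x ∈ q, x ∈ (deps.foldl (pvStep push) (vis, q)).2)
    ∧ (∀ x ∈ (deps.foldl (pvStep push) (vis, q)).2, x ∈ q ∨ x ∈ deps)
    ∧ (∀ x ∈ (deps.foldl (pvStep push) (vis, q)).1, x ∈ vis ∨ x ∈ (deps.foldl (pvStep push) (vis, q)).2)
    ∧ (∀ x ∈ (deps.foldl (pvStep push) (vis, q)).1, x ∈ vis ∨ x ∈ deps)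
    ∧ ((deps.foldl (pvStep push) (vis, q)).2.length + vis.length
        = q.length + (deps.foldl (pvStep push) (vis, q)).1.length)
    ∧ (vis.Nodup → (deps.foldl (pvStep push) (vis, q)).1.Nodup) := by
  induction deps generalizing vis q with
  | nil =>
    simp only [List.foldl_nil]
    exact ⟨List.prefix_refl _, by simp, fun x hx => hx, fun x hx => Or.inl hx,
      fun x hx => Or.inl hx, fun x hx => Or.inl hx, by trivial, fun h => h⟩
  | cons d deps ih =>
    by_cases hd : d ∈ vis
    · have hstep : pvStep push (vis, q) d = (vis, q) := by simp [pvStep, hd]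
      simp only [List.foldl_cons, hstep]
      obtain ⟨i1, i2, i3, i4, i5, i6, i7, i8⟩ := ih vis q
      refine ⟨i1, ?_, i3, fun x hx => (i4 x hx).imp id (by simp; tauto),
        i5, fun x hx => (i6 x hx).imp id (by simp; tauto), i7, i8⟩
      intro e he
      rcases List.mem_cons.mp he with rfl | he
      · exact i1.subset hd
      · exact i2 e he
    · have hstep : pvStep push (vis, q) d = (vis ++ [d], push q d) := by
        simp [pvStep, hd]
      simp only [List.foldl_cons, hstep]
      obtain ⟨i1, i2, i3, i4, i5, i6, i7, i8⟩ := ih (vis ++ [d]) (push q d)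
      have hpre : vis <+: (deps.foldl (pvStep push) (vis ++ [d], push q d)).1 :=
        (List.prefix_append vis [d]).trans i1
      have hdin : d ∈ (deps.foldl (pvStep push) (vis ++ [d], push q d)).1 :=
        i1.subset (by simp)
      have hdq : d ∈ (deps.foldl (pvStep push) (vis ++ [d], push q d)).2 :=
        i3 d ((hp.1 q d d).mpr (Or.inr rfl))
      refine ⟨hpre, ?_, ?_, ?_, ?_, ?_, ?_, ?_⟩
      · intro e he
        rcases List.mem_cons.mp he with rfl | he
        · exact hdin
        · exact i2 e he
      · intro x hx; exact i3 x ((hp.1 q d x).mpr (Or.inl hx))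
      · intro x hx
        rcases i4 x hx with hx' | hx'
        · rcases (hp.1 q d x).mp hx' with h | rfl
          · exact Or.inl h
          · exact Or.inr (by simp)
        · exact Or.inr (by simp [hx'])
      · intro x hx
        rcases i5 x hx with hx' | hx'
        · rcases List.mem_append.mp hx' with h | h
          · exact Or.inl h
          · simp at h; subst h; exact Or.inr hdq
        · exact Or.inr hx'
      · intro x hx
        rcases i6 x hx with hx' | hx'
        · rcases List.mem_append.mp hx' with h | h
          · exact Or.inl h
          · simp at h; subst h; exact Or.inr (by simp)
        · exact Or.inr (by simp [hx'])
      · have hlen := hp.2 q d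
        simp only [List.length_append, List.length_singleton] at i7 ⊢
        omega
      · intro hn
        refine i8 ?_
        simp only [List.nodup_append, hn, List.nodup_singleton, true_and]
        intro a ha b hb
        simp only [List.mem_singleton] at hb
        subst hb
        exact fun h => hd (h ▸ ha)

theorem pvRun_prefix (g : List (String × List String)) (push : List String → String → List String)
    (hp : pvGoodPush push) (f : Nat) (vis : PySem.Set String) (q : List String) :
    vis <+: pvRun g push f vis q := by
  induction f generalizing vis q with
  | zero => exact List.prefix_refl _
  | succ f ih =>
    cases q with
    | nil => exact List.prefix_refl _
    | cons n rest =>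
      simp only [pvRun]
      exact ((pvFold_facts push hp (pvAdj g n) vis rest).1).trans (ih _ _)

theorem pvRun_good (g : List (String × List String)) (push : List String → String → List String)
    (hp : pvGoodPush push) (f : Nat) (vis : PySem.Set String) (q : List String)
    (hn : vis.Nodup) (hs : vis ⊆ pvFlat g) :
    (pvRun g push f vis q).Nodup ∧ pvRun g push f vis q ⊆ pvFlat g := by
  induction f generalizing vis q with
  | zero => exact ⟨hn, hs⟩
  | succ f ih =>
    cases q with
    | nil => exact ⟨hn, hs⟩
    | cons n rest =>
      simp only [pvRun]
      obtain ⟨_, _, _, _, _, i6, _, i8⟩ := pvFold_facts push hp (pvAdj g n) vis rest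
      refine ih _ _ (i8 hn) ?_
      intro x hx
      rcases i6 x hx with h | h
      · exact hs h
      · exact pvAdj_sub g n h

-- the distinct elements of pvFlat, for the fuel bound
def pvU (g : List (String × List String)) : List String := PySem.Set.ofList (pvFlat g)

-- closedness of the final visited set (fuel never runs out under the stated bound)
theorem pvRun_closed (g : List (String × List String)) (push : List String → String → List String)
    (hp : pvGoodPush push) (f : Nat) (vis : PySem.Set String) (q : List String)
    (hn : vis.Nodup) (hs : vis ⊆ pvFlat g)
    (hinv : ∀ v ∈ vis, pvAdj g v ⊆ vis ∨ v ∈ q)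
    (hf : q.length + ((pvU g).length - vis.length) < f) :
    (∀ x ∈ q, pvAdj g x ⊆ pvRun g push f vis q)
    ∧ (∀ v ∈ pvRun g push f vis q, pvAdj g v ⊆ pvRun g push f vis q) := by
  induction f generalizing vis q with
  | zero => omega
  | succ f ih =>
    cases q with
    | nil =>
      refine ⟨by simp, ?_⟩
      intro v hv
      rcases hinv v hv with h | h
      · exact h
      · simp at h
    | cons n rest =>
      simp only [pvRun]
      obtain ⟨i1, i2, i3, i4, i5, i6, i7, i8⟩ := pvFold_facts push hp (pvAdj g n) vis rest
      set st := (pvAdj g n).foldl (pvStep push) (vis, rest) with hst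
      have hn' : st.1.Nodup := i8 hn
      have hs' : st.1 ⊆ pvFlat g := by
        intro x hx
        rcases i6 x hx with h | h
        · exact hs h
        · exact pvAdj_sub g n h
      have hinv' : ∀ v ∈ st.1, pvAdj g v ⊆ st.1 ∨ v ∈ st.2 := by
        intro v hv
        rcases i5 v hv with hv' | hv'
        · rcases hinv v hv' with h | h
          · exact Or.inl (h.trans i1.subset)
          · rcases List.mem_cons.mp h with rfl | h
            · exact Or.inl i2
            · exact Or.inr (i3 v h)
        · exact Or.inr hv'
      have hUsub : st.1.length ≤ (pvU g).length := by
        refine pvNodupLen hn' ?_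
        intro x hx
        exact (PySem.Set.mem_ofList _ _).mpr (hs' hx)
      have hvlen : vis.length ≤ st.1.length := i1.length_le
      have hf' : st.2.length + ((pvU g).length - st.1.length) < f := by
        simp only [List.length_cons] at hf
        omega
      obtain ⟨c1, c2⟩ := ih st.1 st.2 hn' hs' hinv' hf'
      refine ⟨?_, c2⟩
      intro x hx
      rcases List.mem_cons.mp hx with rfl | hx
      · intro y hy
        exact (pvRun_prefix g push hp f st.1 st.2).subset (i2 y hy)
      · exact c1 x (i3 x hx)

-- minimality: the search never leaves a closed superset
theorem pvRun_min (g : List (String × List String)) (push : List String → String → List String)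
    (hp : pvGoodPush push) (f : Nat) (vis : PySem.Set String) (q : List String)
    (C : List String) (hC : ∀ x ∈ C, pvAdj g x ⊆ C) (hv : vis ⊆ C) (hq : ∀ x ∈ q, pvAdj g x ⊆ C) :
    pvRun g push f vis q ⊆ C := by
  induction f generalizing vis q with
  | zero => exact hv
  | succ f ih =>
    cases q with
    | nil => exact hv
    | cons n rest =>
      simp only [pvRun]
      obtain ⟨i1, i2, i3, i4, i5, i6, i7, i8⟩ := pvFold_facts push hp (pvAdj g n) vis rest
      refine ih _ _ ?_ ?_
      · intro x hx
        rcases i6 x hx with h | h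
        · exact hv h
        · exact hq n (by simp) h
      · intro x hx
        rcases i4 x hx with h | h
        · exact hq x (List.mem_cons_of_mem _ h)
        · exact hC x (hq n (by simp) h)

theorem pvFuel_bound (g : List (String × List String)) :
    1 + ((pvU g).length - 0) < pvFuel g := by
  have h1 : (pvU g).length ≤ (pvFlat g).length := PySem.Set.length_ofList_le _
  have h2 : (pvFlat g).length = (g.map (fun p => p.2.length)).sum := by
    unfold pvFlat
    rw [List.length_flatten, List.map_map]
    rfl
  unfold pvFuel
  omega

-- the basic facts about pvRset
theorem pvRset_facts (g : List (String × List String)) (s : String) :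
    (pvAdj g s ⊆ pvRset g s) ∧ (∀ v ∈ pvRset g s, pvAdj g v ⊆ pvRset g s)
    ∧ (pvRset g s).Nodup ∧ pvRset g s ⊆ pvFlat g := by
  have hnil : ([] : List String).Nodup := List.nodup_nil
  have hsub : ([] : List String) ⊆ pvFlat g := by simp
  have hinv : ∀ v ∈ ([] : List String), pvAdj g v ⊆ ([] : List String) ∨ v ∈ [s] := by simp
  have hf : [s].length + ((pvU g).length - ([] : List String).length) < pvFuel g := by
    have := pvFuel_bound g
    simp only [List.length_singleton, List.length_nil]
    omega
  obtain ⟨bq, bc⟩ := pvRun_closed g _ pvGoodPushQ (pvFuel g) [] [s] hnil hsub hinv hf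
  obtain ⟨bn, bs⟩ := pvRun_good g _ pvGoodPushQ (pvFuel g) [] [s] hnil hsub
  exact ⟨bq s (by simp), bc, bn, bs⟩

theorem pvRset_trans (g : List (String × List String)) (s d : String) (hd : d ∈ pvRset g s) :
    pvRset g d ⊆ pvRset g s := by
  obtain ⟨_, hc, _, _⟩ := pvRset_facts g s
  exact pvRun_min g _ pvGoodPushQ (pvFuel g) [] [d] _ hc (by simp)
    (fun x hx => by rw [List.mem_singleton.mp hx]; exact hc d hd)

-- ≥1-edge paths in the graph
inductive pvPath (g : List (String × List String)) : String → String → Prop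
  | single : ∀ {n d}, d ∈ pvAdj g n → pvPath g n d
  | tail : ∀ {n d x}, d ∈ pvAdj g n → pvPath g d x → pvPath g n x

theorem pvPath_snoc (g : List (String × List String)) {n m d : String}
    (hp : pvPath g n m) (hd : d ∈ pvAdj g m) : pvPath g n d := by
  induction hp with
  | single h => exact pvPath.tail h (pvPath.single hd)
  | tail h _ ih => exact pvPath.tail h (ih hd)

-- everything the BFS visits lies on a ≥1-edge path from the start
theorem pvRun_path (g : List (String × List String)) (s : String) (f : Nat)
    (vis : PySem.Set String) (q : List String)
    (hv : ∀ x ∈ vis, pvPath g s x) (hq : ∀ x ∈ q, x = s ∨ pvPath g s x) :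
    ∀ x ∈ pvRun g (fun q d => q ++ [d]) f vis q, pvPath g s x := by
  induction f generalizing vis q with
  | zero => exact hv
  | succ f ih =>
    cases q with
    | nil => exact hv
    | cons n rest =>
      simp only [pvRun]
      obtain ⟨_, _, _, i4, _, i6, _, _⟩ := pvFold_facts _ pvGoodPushQ (pvAdj g n) vis rest
      have hdep : ∀ d ∈ pvAdj g n, pvPath g s d := by
        intro d hd
        rcases hq n (by simp) with rfl | hpn
        · exact pvPath.single hd
        · exact pvPath_snoc g hpn hd
      refine ih _ _ ?_ ?_
      · intro x hx
        rcases i6 x hx with h | h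
        · exact hv x h
        · exact hdep x h
      · intro x hx
        rcases i4 x hx with h | h
        · exact hq x (List.mem_cons_of_mem _ h)
        · exact Or.inr (hdep x h)

theorem pvRset_path (g : List (String × List String)) (s : String) :
    ∀ x ∈ pvRset g s, pvPath g s x :=
  pvRun_path g s (pvFuel g) [] [s] (by simp) (by simp)

-- ----- B-side saturation machinery -----

theorem pvExtra_mem (r : PySem.Dict String (PySem.Set String)) (deps : List String) (x : String) :
    x ∈ pvExtraOf r deps ↔ ∃ d ∈ deps, x ∈ r.getD d [] := by
  have hgen : ∀ acc : PySem.Set String,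
      x ∈ deps.foldl (fun acc d => PySem.Set.union acc (r.getD d [])) acc
        ↔ x ∈ acc ∨ ∃ d ∈ deps, x ∈ r.getD d [] := by
    induction deps with
    | nil => intro acc; simp
    | cons d deps ih =>
      intro acc
      rw [List.foldl_cons, ih]
      rw [show ∀ a b, (a ∈ PySem.Set.union acc b) ↔ a ∈ acc ∨ a ∈ b from
        fun a b => PySem.Set.mem_union acc b a]
      constructor
      · rintro (⟨h | h⟩ | ⟨e, he, hx⟩)
        · exact Or.inl h
        · exact Or.inr ⟨d, by simp, h⟩
        · exact Or.inr ⟨e, by simp [he], hx⟩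
      · rintro (h | ⟨e, he, hx⟩)
        · exact Or.inl (Or.inl h)
        · rcases List.mem_cons.mp he with rfl | he
          · exact Or.inl (Or.inr hx)
          · exact Or.inr ⟨e, he, hx⟩
  have := hgen PySem.Set.empty
  simpa [pvExtraOf] using this

theorem pvUnion_prefix (s t : PySem.Set String) : s <+: PySem.Set.union s t := by
  show s <+: t.foldl PySem.Set.add s
  induction t generalizing s with
  | nil => exact List.prefix_refl _
  | cons x t ih =>
    rw [List.foldl_cons]
    refine List.IsPrefix.trans ?_ (ih (PySem.Set.add s x))
    by_cases h : x ∈ s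
    · rw [show PySem.Set.add s x = s by
        rw [PySem.Set.add, if_pos ((PySem.Set.contains_iff s x).mpr h)]]
    · rw [PySem.Set.add_of_not_mem h]; exact List.prefix_append s [x]

theorem pvIssubset_iff (s t : PySem.Set String) :
    PySem.Set.issubset s t = true ↔ ∀ x ∈ s, x ∈ t := by
  constructor
  · intro h x hx
    simp [PySem.Set.issubset] at h
    have := h x hx
    simpa [PySem.Set.contains_iff] using this
  · intro h
    simp [PySem.Set.issubset]
    intro x hx
    simpa [PySem.Set.contains_iff] using h x hx

-- total size of the reach dictionary, and its bound
def pvSize (r : PySem.Dict String (PySem.Set String)) : Nat :=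
  (r.items.map (fun p => p.2.length)).sum

def pvBound (g : List (String × List String)) : Nat := g.length * (pvFlat g).length

-- the invariant carried through the saturation loop
def pvGoodR (g : List (String × List String)) (r : PySem.Dict String (PySem.Set String)) : Prop :=
  r.items.map Prod.fst = g.map Prod.fst
  ∧ (∀ k, (r.getD k []).Nodup)
  ∧ (∀ p ∈ g, pvAdj g p.1 ⊆ r.getD p.1 [])
  ∧ (∀ k, r.getD k [] ⊆ pvRset g k)

theorem pvSize_le (g : List (String × List String)) (hnd : (g.map Prod.fst).Nodup)
    (r : PySem.Dict String (PySem.Set String)) (hg : pvGoodR g r) : pvSize r ≤ pvBound g := by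
  obtain ⟨hK, hN, _, hS⟩ := hg
  have hkeys : r.keys.Nodup := by
    show (r.items.map Prod.fst).Nodup
    rw [hK]; exact hnd
  have hlen : ∀ x ∈ r.items.map (fun p => p.2.length), x ≤ (pvFlat g).length := by
    intro x hx
    rcases List.mem_map.mp hx with ⟨p, hp, rfl⟩
    have hv : r.getD p.1 [] = p.2 := PySem.Dict.getD_of_mem_items r (by simpa using hp) hkeys []
    have : p.2.Nodup := hv ▸ hN p.1
    refine pvNodupLen this ?_
    intro y hy
    exact (pvRset_facts g p.1).2.2.2 (hS p.1 (hv ▸ hy))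
  calc (r.items.map (fun p => p.2.length)).sum
      ≤ (r.items.map (fun p => p.2.length)).length * (pvFlat g).length := by
        simpa using List.sum_le_card_nsmul _ _ hlen
    _ = g.length * (pvFlat g).length := by
        rw [List.length_map]
        have := congrArg List.length hK
        simp only [List.length_map] at this
        rw [this]

-- all the facts about one pvStepB step
theorem pvStepB_facts (g : List (String × List String)) (hnd : (g.map Prod.fst).Nodup)
    (st : PySem.Dict String (PySem.Set String) × Bool) (p : String × List String)
    (hp : p ∈ g) (hg : pvGoodR g st.1) :
    pvGoodR g (pvStepB st p).1
    ∧ pvSize st.1 ≤ pvSize (pvStepB st p).1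
    ∧ ((pvStepB st p) = st ∨ ((pvStepB st p).2 = true ∧ pvSize st.1 < pvSize (pvStepB st p).1)) := by
  obtain ⟨hK, hN, hG, hS⟩ := hg
  by_cases hsub : PySem.Set.issubset (pvExtraOf st.1 p.2) (st.1.getD p.1 []) = true
  · have : pvStepB st p = st := by simp [pvStepB, hsub]
    rw [this]
    exact ⟨⟨hK, hN, hG, hS⟩, le_refl _, Or.inl rfl⟩
  · have hstep : pvStepB st p
        = (st.1.insert p.1 (PySem.Set.union (st.1.getD p.1 []) (pvExtraOf st.1 p.2)), true) := by
      simp [pvStepB, hsub]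
    set old := st.1.getD p.1 [] with hold
    set ex := pvExtraOf st.1 p.2 with hex
    set nv := PySem.Set.union old ex with hnv
    have hkeys : st.1.keys.Nodup := by
      show (st.1.items.map Prod.fst).Nodup
      rw [hK]; exact hnd
    have hmemk : p.1 ∈ st.1.keys := by
      show p.1 ∈ st.1.items.map Prod.fst
      rw [hK]; exact List.mem_map_of_mem hp
    have hcon : st.1.contains p.1 = true := (PySem.Dict.contains_iff_mem_keys st.1 p.1).mpr hmemk
    have hitems : (st.1.insert p.1 nv).items
        = st.1.items.map (fun q => if q.1 == p.1 then (p.1, nv) else q) :=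
      PySem.Dict.items_insert_of_contains st.1 nv hcon
    have hgetD : ∀ k, (st.1.insert p.1 nv).getD k []
        = if k = p.1 then nv else st.1.getD k [] := by
      intro k; exact PySem.Dict.getD_insert st.1 p.1 k nv []
    have holdpre : old <+: nv := pvUnion_prefix old ex
    have hnvn : ∀ k, ((st.1.insert p.1 nv).getD k []).Nodup := by
      intro k
      rw [hgetD]
      split_ifs with h
      · exact PySem.Set.nodup_union old ex (hN p.1)
      · exact hN k
    have hnvS : ∀ k, (st.1.insert p.1 nv).getD k [] ⊆ pvRset g k := by
      intro k
      rw [hgetD]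
      split_ifs with h
      · subst h
        intro x hx
        rcases (PySem.Set.mem_union old ex x).mp hx with hx | hx
        · exact hS p.1 hx
        · rcases (pvExtra_mem st.1 p.2 x).mp hx with ⟨d, hd, hxd⟩
          have hdadj : d ∈ pvAdj g p.1 := by rw [pvAdj_eq g hnd p hp]; exact hd
          have hdR : d ∈ pvRset g p.1 := (pvRset_facts g p.1).1 hdadj
          exact pvRset_trans g p.1 d hdR (hS d hxd)
      · exact hS k
    have hnvG : ∀ q ∈ g, pvAdj g q.1 ⊆ (st.1.insert p.1 nv).getD q.1 [] := by
      intro q hq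
      rw [hgetD]
      split_ifs with h
      · intro x hx
        have hxo : x ∈ old := by
          have hx2 := hG q hq hx
          rwa [h, ← hold] at hx2
        exact holdpre.subset hxo
      · exact hG q hq
    have hnvK : (st.1.insert p.1 nv).items.map Prod.fst = g.map Prod.fst := by
      rw [hitems, List.map_map, ← hK]
      refine List.map_congr_left ?_
      intro q _
      by_cases h : q.1 = p.1
      · simp [h]
      · simp [h]
    -- the strict size increase
    have hwit : ∃ x ∈ ex, x ∉ old := by
      by_contra hc
      refine hsub ((pvIssubset_iff ex old).mpr ?_)
      intro x hx
      by_contra hxo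
      exact hc ⟨x, hx, hxo⟩
    have hlt : old.length < nv.length := by
      obtain ⟨x, hx, hxo⟩ := hwit
      obtain ⟨rest, hrest⟩ := holdpre
      have hxin : x ∈ nv := (PySem.Set.mem_union old ex x).mpr (Or.inr hx)
      have : x ∈ rest := by
        rw [← hrest] at hxin
        rcases List.mem_append.mp hxin with h | h
        · exact absurd h hxo
        · exact h
      have : rest ≠ [] := fun h => by simp [h] at this
      have : 1 ≤ rest.length := List.length_pos_iff.mpr this
      rw [← hrest, List.length_append]
      omega
    have hsz : pvSize st.1 < pvSize (st.1.insert p.1 nv) := by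
      unfold pvSize
      rw [hitems, List.map_map]
      obtain ⟨q0, hq0, hq0k⟩ : ∃ q ∈ st.1.items, q.1 = p.1 := by
        have : p.1 ∈ st.1.items.map Prod.fst := by rw [hK]; exact List.mem_map_of_mem hp
        rcases List.mem_map.mp this with ⟨q, hq, hqe⟩
        exact ⟨q, hq, hqe⟩
      refine List.sum_lt_sum _ _ ?_ ⟨q0, hq0, ?_⟩
      · rintro ⟨qk, qv⟩ hq
        by_cases h : qk = p.1
        · have h2 := PySem.Dict.getD_of_mem_items st.1 hq hkeys ([] : PySem.Set String)
          rw [h, ← hold] at h2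
          have hle := holdpre.length_le
          simp [h, ← h2]
          omega
        · simp [h]
      · have h2 := PySem.Dict.getD_of_mem_items st.1
          (show (q0.1, q0.2) ∈ st.1.items by simpa using hq0) hkeys ([] : PySem.Set String)
        rw [hq0k, ← hold] at h2
        simp [hq0k, ← h2]
        omega
    rw [hstep]
    exact ⟨⟨hnvK, hnvn, hnvG, hnvS⟩, le_of_lt hsz, Or.inr ⟨rfl, hsz⟩⟩

-- one full pass over the keys
theorem pvPass_facts (g : List (String × List String)) (hnd : (g.map Prod.fst).Nodup)
    (g' : List (String × List String)) (hsub : ∀ p ∈ g', p ∈ g)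
    (st : PySem.Dict String (PySem.Set String) × Bool) (hg : pvGoodR g st.1) :
    pvGoodR g (g'.foldl pvStepB st).1
    ∧ pvSize st.1 ≤ pvSize (g'.foldl pvStepB st).1
    ∧ ((g'.foldl pvStepB st) = st
        ∨ ((g'.foldl pvStepB st).2 = true ∧ pvSize st.1 < pvSize (g'.foldl pvStepB st).1)) := by
  induction g' generalizing st with
  | nil => exact ⟨hg, le_refl _, Or.inl rfl⟩
  | cons p g' ih =>
    have hp : p ∈ g := hsub p (by simp)
    obtain ⟨s1, s2, s3⟩ := pvStepB_facts g hnd st p hp hg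
    rw [List.foldl_cons]
    obtain ⟨t1, t2, t3⟩ := ih (fun q hq => hsub q (List.mem_cons_of_mem _ hq)) (pvStepB st p) s1
    refine ⟨t1, le_trans s2 t2, ?_⟩
    rcases s3 with hs | ⟨hsb, hslt⟩
    · rw [hs] at t1 t2 t3 ⊢
      exact t3
    · rcases t3 with ht | ⟨htb, htlt⟩
      · rw [ht]
        exact Or.inr ⟨hsb, hslt⟩
      · exact Or.inr ⟨htb, lt_of_lt_of_le hslt t2⟩

-- if a pass reports no change, the dictionary is untouched and every key is saturated
theorem pvPass_nochange (g' : List (String × List String))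
    (st : PySem.Dict String (PySem.Set String) × Bool)
    (h : (g'.foldl pvStepB st).2 = false) :
    (g'.foldl pvStepB st) = st
    ∧ ∀ p ∈ g', PySem.Set.issubset (pvExtraOf st.1 p.2) (st.1.getD p.1 []) = true := by
  have htrue : ∀ (g'' : List (String × List String))
      (st' : PySem.Dict String (PySem.Set String) × Bool),
      st'.2 = true → (g''.foldl pvStepB st').2 = true := by
    intro g''
    induction g'' with
    | nil => intro st' h'; exact h'
    | cons q g'' ih =>
      intro st' h'
      rw [List.foldl_cons]
      refine ih _ ?_
      by_cases hs : PySem.Set.issubset (pvExtraOf st'.1 q.2) (st'.1.getD q.1 []) = true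
      · simpa [pvStepB, hs] using h'
      · simp [pvStepB, hs]
  induction g' generalizing st with
  | nil => exact ⟨rfl, by simp⟩
  | cons p g' ih =>
    rw [List.foldl_cons] at h ⊢
    by_cases hs : PySem.Set.issubset (pvExtraOf st.1 p.2) (st.1.getD p.1 []) = true
    · have hstep : pvStepB st p = st := by simp [pvStepB, hs]
      rw [hstep] at h ⊢
      obtain ⟨h1, h2⟩ := ih st h
      refine ⟨h1, ?_⟩
      intro q hq
      rcases List.mem_cons.mp hq with rfl | hq
      · exact hs
      · exact h2 q hq
    · have hstep : (pvStepB st p).2 = true := by simp [pvStepB, hs]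
      rw [htrue g' _ hstep] at h
      exact absurd h (by simp)

-- the saturation loop reaches a fixpoint within its fuel
theorem pvSat_fix (g : List (String × List String)) (hnd : (g.map Prod.fst).Nodup) :
    ∀ (f : Nat) (r : PySem.Dict String (PySem.Set String)), pvGoodR g r →
    pvBound g < pvSize r + f →
    pvGoodR g (pvSat g f r)
    ∧ ∀ p ∈ g, PySem.Set.issubset (pvExtraOf (pvSat g f r) p.2)
        ((pvSat g f r).getD p.1 []) = true := by
  intro f
  induction f with
  | zero =>
    intro r hg hf
    exact absurd (pvSize_le g hnd r hg) (by omega)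
  | succ f ih =>
    intro r hg hf
    obtain ⟨p1, p2, p3⟩ := pvPass_facts g hnd g (fun p hp => hp) (r, false) hg
    by_cases hb : (g.foldl pvStepB (r, false)).2 = true
    · have hlt : pvSize r < pvSize (g.foldl pvStepB (r, false)).1 := by
        rcases p3 with hp | ⟨_, hlt⟩
        · rw [hp] at hb; exact absurd hb (by simp)
        · exact hlt
      have hsat : pvSat g (f+1) r = pvSat g f (g.foldl pvStepB (r, false)).1 := by
        show (let pr := g.foldl pvStepB (r, false);
          if pr.2 then pvSat g f pr.1 else pr.1) = _
        simp [hb]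
      rw [hsat]
      exact ih (g.foldl pvStepB (r, false)).1 p1 (by omega)
    · have hb' : (g.foldl pvStepB (r, false)).2 = false := by simpa using hb
      obtain ⟨h1, h2⟩ := pvPass_nochange g (r, false) hb'
      have hsat : pvSat g (f+1) r = r := by
        show (let pr := g.foldl pvStepB (r, false);
          if pr.2 then pvSat g f pr.1 else pr.1) = r
        rw [h1]
        rfl
      rw [hsat]
      exact ⟨hg, h2⟩

-- at a fixpoint, every ≥1-edge path from a listed key stays inside its reach set
theorem pvFix_path (g : List (String × List String)) (hnd : (g.map Prod.fst).Nodup)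
    (hcl : ∀ p ∈ g, ∀ d ∈ p.2, d ∈ g.map Prod.fst)
    (r : PySem.Dict String (PySem.Set String))
    (hG : ∀ p ∈ g, pvAdj g p.1 ⊆ r.getD p.1 [])
    (hF : ∀ p ∈ g, PySem.Set.issubset (pvExtraOf r p.2) (r.getD p.1 []) = true)
    {n x : String} (hpath : pvPath g n x) (hn : n ∈ g.map Prod.fst) :
    x ∈ r.getD n [] := by
  induction hpath with
  | @single m d h =>
    rcases List.mem_map.mp hn with ⟨p, hp, rfl⟩
    exact hG p hp h
  | @tail m d y h _ ih =>
    rcases List.mem_map.mp hn with ⟨p, hp, rfl⟩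
    have hd : d ∈ p.2 := by rw [← pvAdj_eq g hnd p hp]; exact h
    have hdk : d ∈ g.map Prod.fst := hcl p hp d hd
    have hy : y ∈ r.getD d [] := ih hdk
    have hsub := (pvIssubset_iff _ _).mp (hF p hp)
    exact hsub y ((pvExtra_mem r p.2 y).mpr ⟨d, hd, hy⟩)

-- per key, the fixpoint reach set and A's BFS-visited set have the same length
theorem pvKey_len (g : List (String × List String)) (hnd : (g.map Prod.fst).Nodup)
    (hcl : ∀ p ∈ g, ∀ d ∈ p.2, d ∈ g.map Prod.fst)
    (r : PySem.Dict String (PySem.Set String)) (hg : pvGoodR g r)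
    (hF : ∀ p ∈ g, PySem.Set.issubset (pvExtraOf r p.2) (r.getD p.1 []) = true)
    (k : String) (hk : k ∈ g.map Prod.fst) :
    (r.getD k []).length = (pvRset g k).length := by
  obtain ⟨_, hN, hG, hS⟩ := hg
  have hsub1 : ∀ x ∈ r.getD k [], x ∈ pvRset g k := fun x hx => hS k hx
  have hsub2 : ∀ x ∈ pvRset g k, x ∈ r.getD k [] := by
    intro x hx
    exact pvFix_path g hnd hcl r hG hF (pvRset_path g k x hx) hk
  exact ((List.perm_ext_iff_of_nodup (hN k) (pvRset_facts g k).2.2.1).mpr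
    (fun a => ⟨fun h => hsub1 a h, fun h => hsub2 a h⟩)).length_eq

-- the initial reach dictionary satisfies the invariant
theorem pvInit_good (g : List (String × List String)) (hnd : (g.map Prod.fst).Nodup) :
    pvGoodR g (PySem.Dict.mk (g.map (fun p => (p.1, PySem.Set.ofList p.2)))) := by
  set r0 := PySem.Dict.mk (g.map (fun p => (p.1, PySem.Set.ofList p.2))) with hr0
  have hitems : r0.items = g.map (fun p => (p.1, PySem.Set.ofList p.2)) := rfl
  have hK : r0.items.map Prod.fst = g.map Prod.fst := by
    rw [hitems, List.map_map]; rfl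
  have hkeys : r0.keys.Nodup := by
    show (r0.items.map Prod.fst).Nodup
    rw [hK]; exact hnd
  have hval : ∀ k v, (k, v) ∈ r0.items → ∃ p ∈ g, p.1 = k ∧ v = PySem.Set.ofList p.2 := by
    intro k v hkv
    rw [hitems] at hkv
    rcases List.mem_map.mp hkv with ⟨p, hp, he⟩
    exact ⟨p, hp, congrArg Prod.fst he, (congrArg Prod.snd he).symm⟩
  have hgetD : ∀ p ∈ g, r0.getD p.1 [] = PySem.Set.ofList p.2 := by
    intro p hp
    refine PySem.Dict.getD_of_mem_items r0 ?_ hkeys []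
    rw [hitems]
    exact List.mem_map_of_mem hp
  refine ⟨hK, ?_, ?_, ?_⟩
  · intro k
    cases h : r0.get? k with
    | none => simp [PySem.Dict.getD_eq_get?_getD, h]
    | some v =>
      rcases hval k v (PySem.Dict.mem_items_of_get?_eq_some r0 h) with ⟨p, _, _, rfl⟩
      simp [PySem.Dict.getD_eq_get?_getD, h, PySem.Set.nodup_ofList]
  · intro p hp
    rw [hgetD p hp, pvAdj_eq g hnd p hp]
    intro x hx
    exact (PySem.Set.mem_ofList _ _).mpr hx
  · intro k
    cases h : r0.get? k with
    | none => simp [PySem.Dict.getD_eq_get?_getD, h]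
    | some v =>
      rcases hval k v (PySem.Dict.mem_items_of_get?_eq_some r0 h) with ⟨p, hp, rfl, rfl⟩
      intro x hx
      rw [PySem.Dict.getD_eq_get?_getD, h, Option.getD_some] at hx
      have : x ∈ p.2 := (PySem.Set.mem_ofList _ _).mp hx
      exact (pvRset_facts g p.1).1 (by rw [pvAdj_eq g hnd p hp]; exact this)

theorem pvSatFuel_bound (g : List (String × List String)) : pvBound g < pvSatFuel g := by
  have h2 : (pvFlat g).length = (g.map (fun p => p.2.length)).sum := by
    unfold pvFlat
    rw [List.length_flatten, List.map_map]
    rfl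
  unfold pvBound pvSatFuel
  rw [h2]
  omega

-- ----- A-side bookkeeping (counter = size of the visited set) -----

-- one pass of A's inner fold = the pair fold plus k increments of tdc[start]
theorem pvFold_split (_g : List (String × List String)) (start : String) (deps : List String)
    (vis : PySem.Set String) (q : List String) (tdc : PySem.Dict String Int) :
    deps.foldl
      (fun (st : PySem.Set String × List String × PySem.Dict String Int) dep =>
        if dep ∈ st.1 then st
        else (PySem.Set.add st.1 dep, st.2.1 ++ [dep], st.2.2.modify start 0 (· + 1)))
      (vis, q, tdc)
    = ((deps.foldl (pvStep (fun q d => q ++ [d])) (vis, q)).1,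
       (deps.foldl (pvStep (fun q d => q ++ [d])) (vis, q)).2,
       pvBump tdc start
         ((deps.foldl (pvStep (fun q d => q ++ [d])) (vis, q)).1.length - vis.length)) := by
  induction deps generalizing vis q tdc with
  | nil => simp [pvBump]
  | cons d deps ih =>
    by_cases hd : d ∈ vis
    · have h1 : (pvStep (fun q d => q ++ [d])) (vis, q) d = (vis, q) := by simp [pvStep, hd]
      simp only [List.foldl_cons, if_pos hd, h1]
      exact ih vis q tdc
    · have h1 : (pvStep (fun q d => q ++ [d])) (vis, q) d = (vis ++ [d], q ++ [d]) := by
        rw [pvStep, if_neg hd, PySem.Set.add_of_not_mem hd]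
      simp only [List.foldl_cons, if_neg hd, h1, PySem.Set.add_of_not_mem hd]
      rw [ih (vis ++ [d]) (q ++ [d]) (tdc.modify start 0 (· + 1))]
      have hpre : (vis ++ [d])
          <+: (deps.foldl (pvStep (fun q d => q ++ [d])) (vis ++ [d], q ++ [d])).1 :=
        (pvFold_facts _ pvGoodPushQ deps (vis ++ [d]) (q ++ [d])).1
      have hlen := hpre.length_le
      simp only [List.length_append, List.length_singleton] at hlen
      refine congrArg _ (congrArg _ ?_)
      have harith :
          (deps.foldl (pvStep (fun q d => q ++ [d])) (vis ++ [d], q ++ [d])).1.length - vis.length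
          = ((deps.foldl (pvStep (fun q d => q ++ [d])) (vis ++ [d], q ++ [d])).1.length
              - (vis ++ [d]).length) + 1 := by
        simp only [List.length_append, List.length_singleton]
        omega
      rw [harith]
      unfold pvBump
      rw [Function.iterate_succ_apply]

theorem pvBfsLoop_eq_bump (g : List (String × List String)) (start : String) (f : Nat)
    (vis : PySem.Set String) (q : List String) (tdc : PySem.Dict String Int) :
    pvBfsLoop g start f vis q tdc
      = pvBump tdc start ((pvRun g (fun q d => q ++ [d]) f vis q).length - vis.length) := by
  induction f generalizing vis q tdc with
  | zero => simp [pvBfsLoop, pvRun, pvBump]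
  | succ f ih =>
    cases q with
    | nil => simp [pvBfsLoop, pvRun, pvBump]
    | cons n rest =>
      simp only [pvBfsLoop, pvRun]
      rw [pvFold_split g start (pvAdj g n) vis rest tdc]
      dsimp only
      rw [ih]
      have hpre1 : vis <+: (List.foldl (pvStep (fun q d => q ++ [d])) (vis, rest) (pvAdj g n)).1 :=
        (pvFold_facts _ pvGoodPushQ (pvAdj g n) vis rest).1
      have hpre2 := pvRun_prefix g _ pvGoodPushQ f
        (List.foldl (pvStep (fun q d => q ++ [d])) (vis, rest) (pvAdj g n)).1
        (List.foldl (pvStep (fun q d => q ++ [d])) (vis, rest) (pvAdj g n)).2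
      have h1 := hpre1.length_le
      have h2 := hpre2.length_le
      unfold pvBump
      rw [← Function.iterate_add_apply]
      refine congrFun (congrArg _ ?_) tdc
      omega

theorem pvBump_eq_insert (t : PySem.Dict String Int) (s : String) (k : Nat) (hk : k ≠ 0) :
    pvBump t s k = t.insert s (t.getD s 0 + (k : Int)) := by
  induction k with
  | zero => omega
  | succ m ih =>
    by_cases hm : m = 0
    · subst hm
      simp [pvBump, PySem.Dict.modify]
    · unfold pvBump
      rw [Function.iterate_succ_apply']
      have ihm := ih hm
      unfold pvBump at ihm
      rw [ihm]
      show (t.insert s (t.getD s 0 + (m : Int))).modify s 0 (· + 1) = _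
      rw [PySem.Dict.modify, PySem.Dict.getD_insert_self, PySem.Dict.insert_insert_self]
      congr 1
      push_cast
      ring

theorem pvFoldA (g : List (String × List String)) (ks : List String) (hnd : ks.Nodup)
    (acc : PySem.Dict String Int) (hfresh : ∀ k ∈ ks, acc.contains k = false) :
    (ks.foldl (fun tdc node => pvBfsLoop g node (pvFuel g) PySem.Set.empty [node] tdc) acc).items
      = acc.items ++ ks.filterMap (fun k =>
          if (pvRset g k).length = 0 then none
          else some (k, ((pvRset g k).length : Int))) := by
  induction ks generalizing acc with
  | nil => simp
  | cons k ks ih =>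
    have hk0 : acc.contains k = false := hfresh k (by simp)
    obtain ⟨hknot, hnd'⟩ := List.nodup_cons.mp hnd
    have hb : pvBfsLoop g k (pvFuel g) PySem.Set.empty [k] acc
        = pvBump acc k ((pvRun g (fun q d => q ++ [d]) (pvFuel g) ([] : List String) [k]).length
            - ([] : List String).length) :=
      pvBfsLoop_eq_bump g k (pvFuel g) PySem.Set.empty [k] acc
    rw [List.length_nil, Nat.sub_zero] at hb
    rw [List.foldl_cons, hb]
    by_cases h0 : (pvRun g (fun q d => q ++ [d]) (pvFuel g) ([] : List String) [k]).length = 0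
    · rw [h0]
      have hone : pvBump acc k 0 = acc := rfl
      rw [hone, ih hnd' acc (fun k' hk' => hfresh k' (List.mem_cons_of_mem _ hk'))]
      congr 1
      rw [List.filterMap_cons]
      simp [pvRset, h0]
    · rw [pvBump_eq_insert acc k _ h0, PySem.Dict.getD_of_not_contains acc 0 hk0, zero_add]
      have hfresh' : ∀ k' ∈ ks, (acc.insert k
          ((pvRun g (fun q d => q ++ [d]) (pvFuel g) ([] : List String) [k]).length : Int)).contains k'
          = false := by
        intro k' hk'
        rw [PySem.Dict.contains_insert]
        have hne : (k' == k) = false := by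
          simp only [beq_eq_false_iff_ne, ne_eq]
          intro h
          exact hknot (h ▸ hk')
        rw [hne, hfresh k' (List.mem_cons_of_mem _ hk')]
        rfl
      rw [ih hnd' _ hfresh']
      rw [PySem.Dict.items_insert_of_not_contains acc _ hk0, List.append_assoc]
      congr 1
      rw [List.filterMap_cons]
      simp [pvRset, h0]

-- ===== VERDICT (by name: the statement is the Claim_ definition above) =====
theorem find_transitive_dependents_spec : Claim_equal_find_transitive_dependents := by
  intro g _ hpre
  unfold Spec_find_transitive_dependents
  unfold find_transitive_dependents find_transitive_dependents_alt
  obtain ⟨hnd, hcl⟩ := hpre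
  -- A's side: one entry per key with a nonzero BFS count
  rw [PySem.Dict.keys_mk]
  rw [pvFoldA g (g.map Prod.fst) hnd PySem.Dict.empty (fun k _ => PySem.Dict.contains_empty k)]
  -- B's side: the saturated dictionary
  obtain ⟨hgood, hfix⟩ := pvSat_fix g hnd (pvSatFuel g)
    (PySem.Dict.mk (g.map (fun p => (p.1, PySem.Set.ofList p.2))))
    (pvInit_good g hnd) (by have := pvSatFuel_bound g; omega)
  set r := pvSat g (pvSatFuel g) (PySem.Dict.mk (g.map (fun p => (p.1, PySem.Set.ofList p.2)))) with hr
  have hK : r.items.map Prod.fst = g.map Prod.fst := hgood.1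
  have hkeys : r.keys.Nodup := by
    show (r.items.map Prod.fst).Nodup
    rw [hK]; exact hnd
  have hitems : r.items = (g.map Prod.fst).map (fun k => (k, r.getD k [])) := by
    have := PySem.Dict.items_eq_map_keys r hkeys ([] : PySem.Set String)
    rw [this]
    show (r.items.map Prod.fst).map _ = _
    rw [hK]
  show ([] : List (String × Int)) ++
      (g.map Prod.fst).filterMap (fun k => if (pvRset g k).length = 0 then none
        else some (k, ((pvRset g k).length : Int)))
    = r.items.filterMap (fun p => if p.2.isEmpty then none
        else some (p.1, (PySem.Set.len p.2 : Int)))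
  rw [hitems, List.filterMap_map, List.filterMap_map, List.filterMap_map, List.nil_append]
  refine List.filterMap_congr ?_
  intro p hp
  have hk : p.1 ∈ g.map Prod.fst := List.mem_map_of_mem hp
  have hlen : (r.getD p.1 []).length = (pvRset g p.1).length :=
    pvKey_len g hnd hcl r hgood hfix p.1 hk
  show (if (pvRset g p.1).length = 0 then none else some (p.1, ((pvRset g p.1).length : Int)))
      = (if (r.getD p.1 []).isEmpty then none
          else some (p.1, (PySem.Set.len (r.getD p.1 []) : Int)))
  rw [show (r.getD p.1 []).isEmpty = decide ((r.getD p.1 []).length = 0) by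
    cases h : r.getD p.1 [] <;> simp]
  rw [show PySem.Set.len (r.getD p.1 []) = (r.getD p.1 []).length from rfl]
  rw [hlen]
  by_cases h0 : (pvRset g p.1).length = 0 <;> simp [h0]
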